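-- pv_equiv track=rewrite | github.com/alexsc6955/mini-arcade-core | src/mini_arcade_core/scenes/debug_overlay.py | _non_empty
-- ===== SOURCE A (Python) =====
-- def _non_empty(lines: list[str]) -> list[str]:
--     out: list[str] = []
--     for line in lines:
--         text = str(line)
--         if not text and (not out or out[-1] == ""):
--             continue
--         out.append(text)
--     while out and out[-1] == "":
--         out.pop()
--     return out
-- ===== SOURCE B (Python) =====
-- def _non_empty(lines: list[str]) -> list[str]:
--     texts = [str(line) for line in lines]
--     n = len(texts)
--     res: list[str] = []
--     i = 0
--     while i < n:
--         if texts[i] == "":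
--             res.append("")
--             while i < n and texts[i] == "":  # skip the rest of the empty run
--                 i += 1
--         else:
--             j = i
--             while j < n and texts[j] != "":  # find the end of the non-empty run
--                 j += 1
--             res.extend(texts[i:j])
--             i = j
--     if res and res[0] == "":
--         res = res[1:]
--     if res and res[-1] == "":
--         res = res[:-1]
--     return res
-- ===== Notes on version B (the rewrite author's own statement) =====
-- stated objective: alternative
-- what changed: B scans whole runs at once (emit one '' per empty run, copy each non-empty run), then strips a single leading and trailing blank, replacing A's per-element out[-1] lookback and trailing pop loop.
import Mathlib
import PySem

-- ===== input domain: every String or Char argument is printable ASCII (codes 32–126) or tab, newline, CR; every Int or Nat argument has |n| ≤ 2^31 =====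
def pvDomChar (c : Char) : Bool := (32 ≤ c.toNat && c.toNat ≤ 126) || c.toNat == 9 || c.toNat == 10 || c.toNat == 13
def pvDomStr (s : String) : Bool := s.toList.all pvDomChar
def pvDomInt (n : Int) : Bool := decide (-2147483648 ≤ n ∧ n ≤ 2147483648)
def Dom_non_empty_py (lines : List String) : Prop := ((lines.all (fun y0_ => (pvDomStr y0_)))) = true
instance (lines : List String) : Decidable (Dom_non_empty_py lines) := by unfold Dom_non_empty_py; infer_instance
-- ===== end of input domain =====

-- B collapses empty-line runs by scanning whole runs (takeWhile/dropWhile) and strips one leading/trailing blank afterwards,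
-- instead of A's per-element out[-1] lookback and trailing pop loop; objective: alternative decomposition, same cost.

-- ===== PORT A =====
-- port of `while out and out[-1] == "": out.pop()`
def popTrailingA (out : List String) : List String :=
  if h : out.getLast? = some "" then popTrailingA out.dropLast else out
termination_by out.length
decreasing_by
  cases out with
  | nil => simp at h
  | cons a t => simp

def non_empty_py (lines : List String) : List String :=
  let out := lines.foldl (fun out line =>
    let text := line  -- str(line) on a str returns it unchanged
    if text = "" ∧ (out = [] ∨ out.getLast? = some "") then out
    else out ++ [text]) []
  popTrailingA out

-- ===== PORT B =====
-- port of B's outer while loop over the index i; advancing i past a maximal run = dropWhile, texts[i:j] = takeWhile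
def buildRuns (rest : List String) (res : List String) : List String :=
  match rest with
  | [] => res
  | x :: xs =>
    if x = "" then
      buildRuns (xs.dropWhile (fun y => y == "")) (res ++ [""])
    else
      buildRuns (xs.dropWhile (fun y => y != "")) (res ++ (x :: xs.takeWhile (fun y => y != "")))
termination_by rest.length
decreasing_by
  · have := List.length_dropWhile_le (fun y => y == "") xs; simp; omega
  · have := List.length_dropWhile_le (fun y => y != "") xs; simp; omega

def non_empty_py_alt (lines : List String) : List String :=
  let texts := lines.map (fun line => line)  -- str(line) on a str returns it unchanged
  let res := buildRuns texts []
  let res := if res.head? = some "" then res.tail else res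
  let res := if res.getLast? = some "" then res.dropLast else res
  res

-- ===== PRECONDITION & SPEC =====
def Spec_non_empty_py (lines : List String) (out : List String) : Prop := out = non_empty_py_alt lines
instance (lines : List String) (out : List String) : Decidable (Spec_non_empty_py lines out) := by unfold Spec_non_empty_py; infer_instance

-- ===== CLAIM (what is proved, stated in full; the proofs are below) =====
def Claim_equal_non_empty_py : Prop := ∀ (lines : List String), Dom_non_empty_py lines → Spec_non_empty_py lines (non_empty_py lines)

-- ===== LEMMAS AND PROOFS =====

-- canonical form: one "" per maximal empty run (leading run kept)
def collapse : List String → List String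
  | [] => []
  | x :: xs =>
    if x = "" then "" :: collapse (xs.dropWhile (fun y => y == ""))
    else x :: collapse xs
termination_by l => l.length
decreasing_by
  · have := List.length_dropWhile_le (fun y => y == "") xs; simp; omega
  · simp


theorem collapse_nil : collapse [] = [] := by simp [collapse]

theorem collapse_cons_empty (xs : List String) :
    collapse ("" :: xs) = "" :: collapse (xs.dropWhile (fun y => y == "")) := by
  simp [collapse]

theorem collapse_cons_ne (x : String) (xs : List String) (hx : x ≠ "") :
    collapse (x :: xs) = x :: collapse xs := by
  simp [collapse, hx]

theorem head?_collapse (l : List String) : (collapse l).head? = l.head? := by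
  match l with
  | [] => simp [collapse]
  | x :: xs =>
    by_cases hx : x = ""
    · subst hx; rw [collapse_cons_empty]; rfl
    · rw [collapse_cons_ne _ _ hx]; rfl

theorem collapse_run (xs : List String) :
    collapse xs = xs.takeWhile (fun y => y != "") ++ collapse (xs.dropWhile (fun y => y != "")) := by
  induction xs with
  | nil => simp [collapse]
  | cons x xs ih =>
    by_cases hx : x = ""
    · subst hx; simp
    · rw [collapse_cons_ne _ _ hx]
      simp only [List.takeWhile_cons, List.dropWhile_cons]
      simp [hx, ih]

theorem buildRuns_eq (rest res : List String) : buildRuns rest res = res ++ collapse rest := by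
  induction hn : rest.length using Nat.strong_induction_on generalizing rest res with
  | _ n ih =>
    match rest with
    | [] => simp [buildRuns, collapse]
    | x :: xs =>
      by_cases hx : x = ""
      · subst hx
        rw [buildRuns, if_pos rfl, collapse_cons_empty,
            ih (xs.dropWhile (fun y => y == "")).length (by
              have := List.length_dropWhile_le (fun y => y == "") xs
              subst hn; simp; omega) _ _ rfl]
        simp
      · rw [buildRuns, if_neg hx,
            ih (xs.dropWhile (fun y => y != "")).length (by
              have := List.length_dropWhile_le (fun y => y != "") xs
              subst hn; simp; omega) _ _ rfl]
        rw [collapse_cons_ne _ _ hx, collapse_run xs]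
        simp

-- A's loop, named for the proofs (definitionally the lambda in non_empty_py)
def stepA (out : List String) (line : String) : List String :=
  if line = "" ∧ (out = [] ∨ out.getLast? = some "") then out else out ++ [line]

theorem loopA_ne (ls : List String) : ∀ out : List String, out ≠ [] →
    List.foldl stepA out ls =
      out ++ (if out.getLast? = some "" then collapse (ls.dropWhile (fun y => y == "")) else collapse ls) := by
  induction ls with
  | nil => intro out h; simp [collapse]
  | cons l ls ih =>
    intro out h
    by_cases hlast : out.getLast? = some ""
    · by_cases hl : l = ""
      · subst hl
        rw [List.foldl_cons]
        show List.foldl stepA (stepA out "") ls = _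
        rw [show stepA out "" = out by simp [stepA, h, hlast]]
        rw [ih out h]
        simp [hlast]
      · rw [List.foldl_cons]
        show List.foldl stepA (stepA out l) ls = _
        rw [show stepA out l = out ++ [l] by simp [stepA, hl]]
        rw [ih (out ++ [l]) (by simp)]
        have h2 : (out ++ [l]).getLast? = some l := by simp
        rw [h2]
        simp [hlast, hl, collapse_cons_ne _ _ hl]
    · by_cases hl : l = ""
      · subst hl
        rw [List.foldl_cons]
        show List.foldl stepA (stepA out "") ls = _
        rw [show stepA out "" = out ++ [""] by simp [stepA, h, hlast]]
        rw [ih (out ++ [""]) (by simp)]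
        have h2 : (out ++ [""]).getLast? = some "" := by simp
        rw [h2]
        simp [hlast, collapse_cons_empty]
      · rw [List.foldl_cons]
        show List.foldl stepA (stepA out l) ls = _
        rw [show stepA out l = out ++ [l] by simp [stepA, hl]]
        rw [ih (out ++ [l]) (by simp)]
        have h2 : (out ++ [l]).getLast? = some l := by simp
        rw [h2]
        simp [hlast, hl, collapse_cons_ne _ _ hl]

theorem loopA_nil (ls : List String) :
    List.foldl stepA [] ls = collapse (ls.dropWhile (fun y => y == "")) := by
  induction ls with
  | nil => simp [collapse]
  | cons l ls ih =>
    by_cases hl : l = ""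
    · subst hl
      rw [List.foldl_cons]
      show List.foldl stepA (stepA [] "") ls = _
      rw [show stepA [] "" = [] by simp [stepA]]
      rw [ih]; simp
    · rw [List.foldl_cons]
      show List.foldl stepA (stepA [] l) ls = _
      rw [show stepA [] l = [l] by simp [stepA, hl]]
      rw [show ([l] : List String) = [] ++ [l] by simp] at *
      rw [loopA_ne ls ([] ++ [l]) (by simp)]
      have h2 : (([] : List String) ++ [l]).getLast? = some l := by simp
      rw [h2]
      simp [hl, collapse_cons_ne _ _ hl]

-- no two adjacent empties
def noTwo : List String → Prop
  | [] => True
  | [_] => True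
  | a :: b :: t => ¬(a = "" ∧ b = "") ∧ noTwo (b :: t)

theorem noTwo_cons (x : String) (l : List String) (hx : x ≠ "") (h : noTwo l) :
    noTwo (x :: l) := by
  match l with
  | [] => trivial
  | y :: t => exact ⟨fun hc => hx hc.1, h⟩

theorem noTwo_collapse (l : List String) : noTwo (collapse l) := by
  induction hn : l.length using Nat.strong_induction_on generalizing l with
  | _ n ih =>
    match l with
    | [] => rw [collapse_nil]; trivial
    | x :: xs =>
      by_cases hx : x = ""
      · subst hx
        rw [collapse_cons_empty]
        have hrec : noTwo (collapse (xs.dropWhile (fun y => y == ""))) :=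
          ih (xs.dropWhile (fun y => y == "")).length (by
            have := List.length_dropWhile_le (fun y => y == "") xs
            subst hn; simp; omega) _ rfl
        match hC : collapse (xs.dropWhile (fun y => y == "")) with
        | [] => trivial
        | y :: t =>
          refine ⟨fun hc => ?_, hC ▸ hrec⟩
          have hy : (xs.dropWhile (fun y => y == "")).head? = some y := by
            rw [← head?_collapse, hC]; rfl
          have := List.head?_dropWhile_not (fun y => y == "") xs
          rw [hy] at this
          simp [hc.2] at this
      · rw [collapse_cons_ne _ _ hx]
        exact noTwo_cons _ _ hx (ih xs.length (by subst hn; simp) _ rfl)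

theorem popTrailingA_id (l : List String) (h : l.getLast? ≠ some "") :
    popTrailingA l = l := by
  rw [popTrailingA, dif_neg h]

theorem getLast?_cons_ne_nil (a : String) (l : List String) (h : l ≠ []) :
    (a :: l).getLast? = l.getLast? := by
  rw [List.getLast?_cons]
  cases hl : l.getLast? with
  | none => exact absurd (List.getLast?_eq_none_iff.mp hl) h
  | some v => rfl

theorem noTwo_dropLast_last (l : List String) (hc : noTwo l)
    (hl : l.getLast? = some "") : l.dropLast.getLast? ≠ some "" := by
  induction l with
  | nil => simp at hl
  | cons a l ih =>
    match l, hc with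
    | [], _ => simp
    | b :: t, ⟨hab, hbt⟩ =>
      have hl' : (b :: t).getLast? = some "" := by
        rw [List.getLast?_cons_cons] at hl; exact hl
      match t with
      | [] =>
        have hb : b = "" := by simpa using hl'
        have ha : a ≠ "" := fun h0 => hab ⟨h0, hb⟩
        simpa using ha
      | c :: t' =>
        have hne : (b :: c :: t').dropLast ≠ [] := by simp
        rw [show (a :: b :: c :: t').dropLast = a :: (b :: c :: t').dropLast from rfl,
            getLast?_cons_ne_nil _ _ hne]
        exact ih hbt hl'

theorem popTrailingA_eq_strip (l : List String) (hc : noTwo l) :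
    popTrailingA l = (if l.getLast? = some "" then l.dropLast else l) := by
  by_cases h : l.getLast? = some ""
  · rw [if_pos h, popTrailingA, dif_pos h]
    exact popTrailingA_id _ (noTwo_dropLast_last l hc h)
  · rw [if_neg h]; exact popTrailingA_id _ h

theorem stripLead_collapse (l : List String) :
    (if (collapse l).head? = some "" then (collapse l).tail else collapse l) =
      collapse (l.dropWhile (fun y => y == "")) := by
  match l with
  | [] => simp [collapse]
  | x :: xs =>
    by_cases hx : x = ""
    · subst hx
      rw [collapse_cons_empty]
      simp [List.dropWhile_cons]
    · rw [collapse_cons_ne _ _ hx]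
      simp [hx, collapse_cons_ne _ _ hx]

-- ===== VERDICT =====
theorem non_empty_py_spec : Claim_equal_non_empty_py := by
  intro lines _
  show non_empty_py lines = non_empty_py_alt lines
  unfold non_empty_py non_empty_py_alt
  simp only [List.map_id_fun']
  rw [show (fun (out : List String) (line : String) =>
        if line = "" ∧ (out = [] ∨ out.getLast? = some "") then out else out ++ [line]) = stepA from rfl]
  rw [loopA_nil, buildRuns_eq]
  simp only [List.nil_append]
  rw [stripLead_collapse]
  exact popTrailingA_eq_strip _ (noTwo_collapse _)
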